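-- pv_equiv track=rewrite | github.com/Xilinx/Vitis-AI | src/vai_optimizer/nndct_shared/pruning/utils.py | generate_indices_group
-- ===== SOURCE A (Python) =====
-- from typing import List
--
-- def generate_indices_group(indices: List[int], dim_size: int,
--                            groups: int) -> List[List[int]]:
--   indices_set = set(indices)
--   interval: int = dim_size // groups
--   start_idx = 0
--   end_idx = interval
--   ret: List[List[int]] = []
--   while start_idx < dim_size:
--     idx_group: List[int] = []
--     for i in range(start_idx, end_idx):
--       if i in indices_set:
--         idx_group.append(i - start_idx)
--     ret.append(idx_group)
--     start_idx = end_idx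
--     end_idx += interval
--   return ret
-- ===== SOURCE B (Python) =====
-- from typing import List
--
-- def generate_indices_group(indices: List[int], dim_size: int,
--                            groups: int) -> List[List[int]]:
--   interval = dim_size // groups
--   if dim_size <= 0:
--     return []
--   n = -(-dim_size // interval)  # number of partitions = ceil(dim_size / interval)
--   ret: List[List[int]] = [[] for _ in range(n)]
--   for i in sorted(set(indices)):
--     if 0 <= i < n * interval:
--       ret[i // interval].append(i % interval)
--   return ret
-- ===== Notes on version B (the rewrite author's own statement) =====
-- stated objective: alternative
-- what changed: Instead of scanning every position 0..dim_size-1 and testing set membership, B preallocates the per-partition lists and places each distinct index of sorted(set(indices)) directly into its partition via i // interval and i % interval.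
import Mathlib
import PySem

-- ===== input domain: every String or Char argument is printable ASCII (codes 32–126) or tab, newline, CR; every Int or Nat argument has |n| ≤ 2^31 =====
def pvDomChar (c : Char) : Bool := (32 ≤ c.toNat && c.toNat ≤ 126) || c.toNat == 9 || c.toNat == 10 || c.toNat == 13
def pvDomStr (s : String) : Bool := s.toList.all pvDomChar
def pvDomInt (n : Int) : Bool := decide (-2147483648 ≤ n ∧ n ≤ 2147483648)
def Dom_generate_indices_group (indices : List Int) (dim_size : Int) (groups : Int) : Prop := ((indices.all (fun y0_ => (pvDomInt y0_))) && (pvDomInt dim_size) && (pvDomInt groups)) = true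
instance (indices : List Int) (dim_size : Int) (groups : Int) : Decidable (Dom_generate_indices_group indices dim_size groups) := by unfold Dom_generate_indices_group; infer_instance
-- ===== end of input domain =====

-- B replaces A's membership scan over every position 0..dim_size-1 with preallocated
-- per-partition lists filled by placing each distinct sorted index via i // interval, i % interval.

-- ===== PORT A =====
-- the while loop of A; fuel only makes the recursion total (under Pre_ the loop runs
-- at most dim_size.toNat iterations since interval ≥ 1, so the fuel never runs out)
def pvAloop (s : List Int) (dim interval : Int) : Nat → Int → Int → List (List Int) → List (List Int)
  | 0, _, _, ret => ret
  | fuel+1, startIdx, endIdx, ret =>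
    if startIdx < dim then
      let idxGroup : List Int := (PySem.List.pyRange startIdx endIdx 1).foldl
        (fun acc i => if PySem.Set.contains s i then acc ++ [i - startIdx] else acc) []
      pvAloop s dim interval fuel endIdx (endIdx + interval) (ret ++ [idxGroup])
    else ret

def generate_indices_group (indices : List Int) (dim_size : Int) (groups : Int) : List (List Int) :=
  let indicesSet := PySem.Set.ofList indices
  let interval := PySem.Int.floordiv dim_size groups
  pvAloop indicesSet dim_size interval dim_size.toNat 0 interval []

-- ===== PORT B =====
def generate_indices_group_alt (indices : List Int) (dim_size : Int) (groups : Int) : List (List Int) :=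
  let interval := PySem.Int.floordiv dim_size groups
  if dim_size ≤ 0 then []
  else
    let n : Int := -(PySem.Int.floordiv (-dim_size) interval)
    let init : List (List Int) := (List.range n.toNat).map (fun _ => ([] : List Int))
    (PySem.List.sorted (PySem.Set.ofList indices) (fun x => x) false).foldl
      (fun ret i =>
        if 0 ≤ i ∧ i < n * interval then
          ret.modify (PySem.Int.floordiv i interval).toNat
            (fun g => g ++ [PySem.Int.mod i interval])
        else ret) init

-- ===== PRECONDITION & SPEC =====
-- Pre_ excludes exactly the inputs where the Python A does not return: groups = 0
-- (ZeroDivisionError) and dim_size > 0 with interval = dim_size // groups ≤ 0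
-- (the while loop never advances: infinite loop).
def Pre_generate_indices_group (indices : List Int) (dim_size : Int) (groups : Int) : Prop :=
  groups ≠ 0 ∧ (dim_size ≤ 0 ∨ 1 ≤ PySem.Int.floordiv dim_size groups)
instance (indices : List Int) (dim_size : Int) (groups : Int) : Decidable (Pre_generate_indices_group indices dim_size groups) := by unfold Pre_generate_indices_group; infer_instance

def pvWitness_generate_indices_group : List Int × Int × Int := ([0, 2, 3, 5], 6, 3)

def Spec_generate_indices_group (indices : List Int) (dim_size : Int) (groups : Int) (out : List (List Int)) : Prop := out = generate_indices_group_alt indices dim_size groups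
instance (indices : List Int) (dim_size : Int) (groups : Int) (out : List (List Int)) : Decidable (Spec_generate_indices_group indices dim_size groups out) := by unfold Spec_generate_indices_group; infer_instance

-- ===== CLAIM (what is proved, stated in full; the proofs are below) =====
def Claim_equal_generate_indices_group : Prop := ∀ (indices : List Int) (dim_size : Int) (groups : Int), Dom_generate_indices_group indices dim_size groups → Pre_generate_indices_group indices dim_size groups → Spec_generate_indices_group indices dim_size groups (generate_indices_group indices dim_size groups)

-- ===== LEMMAS AND PROOFS =====

-- one partition of A's answer, starting at `start`
def pvGrp (s : List Int) (interval start : Int) : List Int :=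
  ((PySem.List.pyRange start (start + interval) 1).filter (fun i => PySem.Set.contains s i)).map
    (fun i => i - start)

-- A's partitions, m of them, starting at `start` and stepping by `interval`
def pvParts (s : List Int) (interval : Int) : Nat → Int → List (List Int)
  | 0, _ => []
  | m+1, start => pvGrp s interval start :: pvParts s interval m (start + interval)

lemma pvGrp_eq_foldl (s : List Int) (interval start : Int) :
    (PySem.List.pyRange start (start + interval) 1).foldl
      (fun acc i => if PySem.Set.contains s i then acc ++ [i - start] else acc) []
      = pvGrp s interval start := by
  rw [PySem.List.foldl_append_if]
  simp only [List.nil_append, pvGrp]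

lemma pvParts_eq (s : List Int) (interval : Int) :
    ∀ (m : Nat) (start : Int), pvParts s interval m start
      = (List.range m).map (fun j : Nat => pvGrp s interval (start + (j : Int) * interval)) := by
  intro m
  induction m with
  | zero => intro start; simp [pvParts]
  | succ m ih =>
    intro start
    rw [List.range_succ_eq_map, List.map_cons]
    simp only [pvParts, List.map_map, ih (start + interval)]
    norm_num
    intro a _
    congr 1
    ring

-- A's loop, with fuel ≥ the number m of remaining iterations, produces `pvParts`
lemma pvAloop_eq (s : List Int) (dim interval : Int) :
    ∀ (fuel m : Nat) (start : Int) (ret : List (List Int)),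
      m ≤ fuel →
      dim ≤ start + (m : Int) * interval →
      (∀ j : Nat, j < m → start + (j : Int) * interval < dim) →
      pvAloop s dim interval fuel start (start + interval) ret = ret ++ pvParts s interval m start := by
  intro fuel
  induction fuel with
  | zero =>
    intro m start ret hle _ _
    interval_cases m
    simp [pvAloop, pvParts]
  | succ fuel ih =>
    intro m start ret hle hub hlt
    match m with
    | 0 =>
      have : ¬ start < dim := by simp at hub; omega
      simp [pvAloop, this, pvParts]
    | Nat.succ m' =>
      have hlt0 : start < dim := by have := hlt 0 (by omega); simpa using this
      simp only [pvAloop, if_pos hlt0]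
      rw [pvGrp_eq_foldl]
      rw [ih m' (start + interval) (ret ++ [pvGrp s interval start]) (by omega)
        (by push_cast at hub ⊢; nlinarith [hub]) ?_]
      · simp [pvParts, pvGrp]
      · intro j hj
        have := hlt (j+1) (by omega)
        push_cast at this ⊢
        nlinarith [this]

lemma pv_modify_map_range (nn k : Nat) (g0 : Nat → List Int) (h : List Int → List Int) :
    ((List.range nn).map g0).modify k h = (List.range nn).map (fun j => if j = k then h (g0 j) else g0 j) := by
  apply List.ext_getElem
  · simp
  · intro j hj hj'
    simp [List.getElem_modify, eq_comm]

-- B's fold over an nn-slot table of partial groups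
lemma pvBfold_eq (interval : Int) (nI : Int) (hI : 1 ≤ interval) :
    ∀ (L : List Int) (nn : Nat) (g0 : Nat → List Int), ((nn : Int) * interval = nI) →
      L.foldl (fun ret i =>
          if 0 ≤ i ∧ i < nI then
            ret.modify (PySem.Int.floordiv i interval).toNat
              (fun g => g ++ [PySem.Int.mod i interval])
          else ret) ((List.range nn).map g0)
      = (List.range nn).map (fun j : Nat =>
          g0 j ++ (L.filter (fun i => decide ((j : Int) * interval ≤ i ∧ i < ((j : Int) + 1) * interval))).map
            (fun i => PySem.Int.mod i interval)) := by
  intro L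
  induction L with
  | nil =>
    intro nn g0 _
    simp
  | cons i L ih =>
    intro nn g0 hb
    rw [List.foldl_cons]
    by_cases hp : 0 ≤ i ∧ i < nI
    · rw [if_pos hp]
      have hq0 : 0 ≤ PySem.Int.floordiv i interval := by
        rw [PySem.Int.floordiv_eq_ediv_of_pos (by omega)]
        exact Int.ediv_nonneg hp.1 (by omega)
      set q := PySem.Int.floordiv i interval with hqdef
      have hqi : q * interval ≤ i ∧ i < (q + 1) * interval :=
        (PySem.Int.floordiv_eq_iff_of_pos (by omega)).mp hqdef.symm
      have hqcast : ((q.toNat : Int)) = q := Int.toNat_of_nonneg hq0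
      rw [pv_modify_map_range, ih nn _ hb]
      apply List.map_congr_left
      intro j hj
      rw [List.filter_cons]
      by_cases hjq : j = q.toNat
      · subst hjq
        have hpt : (decide ((q.toNat : Int) * interval ≤ i ∧ i < ((q.toNat : Int) + 1) * interval)) = true := by
          simp only [decide_eq_true_eq]
          rw [hqcast]; exact hqi
        rw [if_pos rfl, if_pos hpt]
        simp
      · have hne : ¬ ((j : Int) * interval ≤ i ∧ i < ((j : Int) + 1) * interval) := by
          intro hc
          apply hjq
          have : (j : Int) = q := by
            rw [hqdef]
            exact ((PySem.Int.floordiv_eq_iff_of_pos (by omega)).mpr hc).symm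
          omega
        rw [if_neg hjq, if_neg (by simpa using hne)]
    · rw [if_neg hp]
      rw [ih nn g0 hb]
      apply List.map_congr_left
      intro j hjmem
      rw [List.filter_cons]
      have hjn : (j : Int) < nn := by exact_mod_cast List.mem_range.mp hjmem
      have hne : ¬ ((j : Int) * interval ≤ i ∧ i < ((j : Int) + 1) * interval) := by
        intro hc
        apply hp
        constructor
        · have : 0 ≤ (j : Int) * interval := mul_nonneg (by positivity) (by omega)
          omega
        · calc i < ((j : Int) + 1) * interval := hc.2
            _ ≤ (nn : Int) * interval := by
              apply mul_le_mul_of_nonneg_right _ (by omega)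
              omega
            _ = nI := hb
      simp [hne]

-- two strictly increasing lists with the same members are equal
lemma pv_eq_of_pairwise_lt (l₁ l₂ : List Int) (h₁ : l₁.Pairwise (· < ·))
    (h₂ : l₂.Pairwise (· < ·)) (hm : ∀ x, x ∈ l₁ ↔ x ∈ l₂) : l₁ = l₂ := by
  have n₁ : l₁.Nodup := h₁.imp (fun h => ne_of_lt h)
  have n₂ : l₂.Nodup := h₂.imp (fun h => ne_of_lt h)
  have hp : l₁.Perm l₂ := (List.perm_ext_iff_of_nodup n₁ n₂).mpr hm
  exact hp.eq_of_pairwise (fun a b _ _ hab hba => absurd hba (lt_asymm hab)) h₁ h₂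

-- the j-th partition of A's answer is the j-th slot of B's table
lemma pvGrp_eq (indices : List Int) (interval : Int) (hI : 1 ≤ interval) (j : Int) (hj : 0 ≤ j) :
    pvGrp (PySem.Set.ofList indices) interval (j * interval)
      = ((PySem.List.sorted (PySem.Set.ofList indices) (fun x => x) false).filter
          (fun i => decide (j * interval ≤ i ∧ i < (j + 1) * interval))).map
          (fun i => PySem.Int.mod i interval) := by
  have hone : (j + 1) * interval = j * interval + interval := by ring
  have hlists : (PySem.List.pyRange (j * interval) (j * interval + interval) 1).filter
        (fun i => PySem.Set.contains (PySem.Set.ofList indices) i)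
      = (PySem.List.sorted (PySem.Set.ofList indices) (fun x => x) false).filter
          (fun i => decide (j * interval ≤ i ∧ i < (j + 1) * interval)) := by
    apply pv_eq_of_pairwise_lt
    · exact List.Pairwise.sublist List.filter_sublist (PySem.List.pairwise_lt_pyRange_one _ _)
    · exact List.Pairwise.sublist List.filter_sublist (PySem.List.sorted_ofList_pairwise_lt _)
    · intro x
      simp only [List.mem_filter, PySem.List.mem_pyRange_one, PySem.List.mem_sorted,
        PySem.Set.mem_ofList, PySem.Set.contains_iff, decide_eq_true_eq, hone]
      tauto
  rw [pvGrp, hlists]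
  apply List.map_congr_left
  intro x hx
  have hb : j * interval ≤ x ∧ x < (j + 1) * interval := by
    have := (List.mem_filter.mp hx).2
    simpa using this
  have hdiv : PySem.Int.floordiv x interval = j :=
    (PySem.Int.floordiv_eq_iff_of_pos (by omega)).mpr hb
  have := PySem.Int.floordiv_mul_add_mod x interval
  rw [hdiv] at this
  omega

-- ===== VERDICT (by name: the statement is the Claim_ definition above) =====
theorem generate_indices_group_spec : Claim_equal_generate_indices_group := by
  intro indices dim groups _ hpre
  obtain ⟨hg, hcase⟩ := hpre
  unfold Spec_generate_indices_group generate_indices_group generate_indices_group_alt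
  simp only []
  by_cases hdim : dim ≤ 0
  · rw [if_pos hdim, Int.toNat_of_nonpos hdim]
    rfl
  · rw [not_le] at hdim
    set s := PySem.Set.ofList indices with hs
    set I := PySem.Int.floordiv dim groups with hIdef
    have hI : 1 ≤ I := by
      rcases hcase with h | h
      · omega
      · exact h
    rw [if_neg (by omega)]
    set n : Int := -(PySem.Int.floordiv (-dim) I) with hndef
    have hn : (n - 1) * I < dim ∧ dim ≤ n * I :=
      (PySem.Int.neg_floordiv_neg_eq_iff_of_pos (by omega)).mp hndef.symm
    have hn1 : 1 ≤ n := by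
      by_contra hc
      have : n * I ≤ 0 := mul_nonpos_of_nonpos_of_nonneg (by omega) (by omega)
      omega
    have hncast : ((n.toNat : Int)) = n := Int.toNat_of_nonneg (by omega)
    have hndim : n ≤ dim := by
      have h1 : n - 1 ≤ (n - 1) * I := le_mul_of_one_le_right (by omega) hI
      omega
    have hA := pvAloop_eq s dim I dim.toNat n.toNat 0 []
      (by omega)
      (by rw [zero_add, hncast]; exact hn.2)
      (by
        intro j hj
        rw [zero_add]
        have hj' : (j : Int) ≤ n - 1 := by omega
        calc (j : Int) * I ≤ (n - 1) * I := mul_le_mul_of_nonneg_right hj' (by omega)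
          _ < dim := hn.1)
    rw [zero_add] at hA
    rw [hA, pvParts_eq, List.nil_append]
    rw [pvBfold_eq I (n * I) hI _ n.toNat (fun _ => ([] : List Int)) (by rw [hncast])]
    apply List.map_congr_left
    intro j _
    rw [List.nil_append, zero_add]
    exact pvGrp_eq indices I hI (j : Int) (by positivity)
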